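-- pv_equiv track=rewrite | github.com/JingfengPan/52011_final_project | random_split.py | random_split_chunk_by_chunk
-- ===== SOURCE A (Python) =====
-- def random_split_chunk_by_chunk(dataset, n_clus, buffer_size=10000):
--     clusters = []
--
--     total_chunks = len(dataset) // buffer_size + (1 if len(dataset) % buffer_size > 0 else 0)
--
--     for chunk_index in range(total_chunks):
--         cluster_label = chunk_index % n_clus
--         for _ in range(buffer_size):
--             if len(clusters) >= len(dataset):
--                 break
--             clusters.append(cluster_label)
--
--     return clusters
-- ===== SOURCE B (Python) =====
-- def random_split_chunk_by_chunk(dataset, n_clus, buffer_size=10000):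
--     # label of element i is its chunk index modulo n_clus: one flat pass, no nested loops
--     return [(i // buffer_size) % n_clus for i in range(len(dataset))]
-- ===== Notes on version B (the rewrite author's own statement) =====
-- stated objective: simpler
-- what changed: Replaced the nested chunk loops with break logic by a single flat pass over the indices, computing each element's label directly as (i // buffer_size) % n_clus.
-- outside the precondition, e.g. on random_split_chunk_by_chunk([1, 2, 3], 2, -2): A returns [], B returns [0, 1, 1]
import Mathlib
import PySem

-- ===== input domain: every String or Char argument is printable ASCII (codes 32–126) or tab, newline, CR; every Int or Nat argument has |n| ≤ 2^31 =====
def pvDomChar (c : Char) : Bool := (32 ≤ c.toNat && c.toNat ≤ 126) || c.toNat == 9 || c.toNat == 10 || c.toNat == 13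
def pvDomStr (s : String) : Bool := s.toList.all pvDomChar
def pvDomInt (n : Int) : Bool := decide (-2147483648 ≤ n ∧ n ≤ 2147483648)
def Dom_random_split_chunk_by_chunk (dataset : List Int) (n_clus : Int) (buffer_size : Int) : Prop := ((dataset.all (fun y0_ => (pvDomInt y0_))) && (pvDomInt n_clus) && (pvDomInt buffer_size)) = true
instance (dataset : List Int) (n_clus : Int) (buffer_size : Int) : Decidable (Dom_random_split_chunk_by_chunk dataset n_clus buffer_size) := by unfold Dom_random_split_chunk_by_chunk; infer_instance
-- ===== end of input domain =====

-- Return-value equivalence of the chunked label assignment: B computes each label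
-- directly from its global index in one flat pass (objective: simpler).


-- ===== PORT A =====
-- A's inner loop 'for _ in range(buffer_size): if len(clusters) >= len(dataset): break; append'
-- ported step for step as a recursion on the remaining iteration count that STOPS (breaks)
-- when the condition holds.
def pvInnerLoopA (dataset : List Int) (cluster_label : Int) : Nat → List Int → List Int
  | 0, clusters => clusters
  | t + 1, clusters =>
    if PySem.List.len clusters ≥ PySem.List.len dataset then clusters
    else pvInnerLoopA dataset cluster_label t (clusters ++ [cluster_label])

def random_split_chunk_by_chunk (dataset : List Int) (n_clus : Int) (buffer_size : Int) : List Int :=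
  let clusters : List Int := []
  let total_chunks : Int :=
    PySem.Int.floordiv (PySem.List.len dataset) buffer_size +
      (if PySem.Int.mod (PySem.List.len dataset) buffer_size > 0 then 1 else 0)
  (PySem.List.pyRange 0 total_chunks 1).foldl
    (fun clusters chunk_index =>
      let cluster_label := PySem.Int.mod chunk_index n_clus
      pvInnerLoopA dataset cluster_label buffer_size.toNat clusters)
    clusters

-- ===== PORT B =====
def random_split_chunk_by_chunk_alt (dataset : List Int) (n_clus : Int) (buffer_size : Int) : List Int :=
  (PySem.List.pyRange 0 (PySem.List.len dataset) 1).map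
    (fun i => PySem.Int.mod (PySem.Int.floordiv i buffer_size) n_clus)

-- ===== PRECONDITION & SPEC =====
-- Pre_ excludes: buffer_size = 0 (A raises ZeroDivisionError), n_clus = 0 with a nonempty
-- dataset (A raises ZeroDivisionError at 'chunk_index % n_clus'), and a NEGATIVE buffer_size
-- with a nonempty dataset — a negative chunk size outside the natural domain, where A's
-- empty result is an accident of floor division making total_chunks negative.
def Pre_random_split_chunk_by_chunk (dataset : List Int) (n_clus : Int) (buffer_size : Int) : Prop :=
  (0 < buffer_size ∧ (n_clus ≠ 0 ∨ dataset = [])) ∨ (dataset = [] ∧ buffer_size ≠ 0)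
instance (dataset : List Int) (n_clus : Int) (buffer_size : Int) : Decidable (Pre_random_split_chunk_by_chunk dataset n_clus buffer_size) := by unfold Pre_random_split_chunk_by_chunk; infer_instance

def pvWitness_random_split_chunk_by_chunk : List Int × Int × Int := ([5, 7, 9, 11, 13], 2, 2)

def Spec_random_split_chunk_by_chunk (dataset : List Int) (n_clus : Int) (buffer_size : Int) (out : List Int) : Prop := out = random_split_chunk_by_chunk_alt dataset n_clus buffer_size
instance (dataset : List Int) (n_clus : Int) (buffer_size : Int) (out : List Int) : Decidable (Spec_random_split_chunk_by_chunk dataset n_clus buffer_size out) := by unfold Spec_random_split_chunk_by_chunk; infer_instance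

-- ===== CLAIM (what is proved, stated in full; the proofs are below) =====
def Claim_equal_random_split_chunk_by_chunk : Prop := ∀ (dataset : List Int) (n_clus : Int) (buffer_size : Int), Dom_random_split_chunk_by_chunk dataset n_clus buffer_size → Pre_random_split_chunk_by_chunk dataset n_clus buffer_size → Spec_random_split_chunk_by_chunk dataset n_clus buffer_size (random_split_chunk_by_chunk dataset n_clus buffer_size)

-- ===== LEMMAS AND PROOFS =====

-- The inner loop of A appends the label L until the length reaches len(dataset), hence
-- appends min(#steps, len(dataset) - current length) copies of L.
lemma pv_inner_fold (dataset : List Int) (L : Int) : ∀ (t : Nat) (cl : List Int),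
    pvInnerLoopA dataset L t cl
      = cl ++ List.replicate (min t (((dataset.length : Int)) - (cl.length : Int)).toNat) L := by
  intro t
  induction t with
  | zero => intro cl; simp [pvInnerLoopA]
  | succ t ih =>
    intro cl
    rw [pvInnerLoopA]
    simp only [PySem.List.len_eq]
    by_cases h : ((cl.length : Nat) : Int) ≥ ((dataset.length : Nat) : Int)
    · rw [if_pos h]
      have : (((dataset.length : Int)) - (cl.length : Int)).toNat = 0 := by omega
      simp [this]
    · rw [if_neg h, ih (cl ++ [L])]
      have h2 : min (t + 1) ((((dataset.length : Int)) - (cl.length : Int)).toNat)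
          = min t ((((dataset.length : Int)) - (((cl ++ [L]).length : Nat) : Int)).toNat) + 1 := by
        simp only [List.length_append, List.length_singleton]; omega
      simp only [h2, List.replicate_succ, List.append_assoc, List.singleton_append]

-- Outer-loop invariant: after k chunks, A has produced exactly B's labels for the
-- first min(k * buffer_size, len(dataset)) indices.
lemma pv_outer_inv (dataset : List Int) (n_clus b : Int) (hb : 0 < b) :
    ∀ (k : Nat),
      (PySem.List.pyRange 0 (k : Int) 1).foldl
        (fun clusters chunk_index =>
          pvInnerLoopA dataset (PySem.Int.mod chunk_index n_clus) b.toNat clusters)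
        []
      = (PySem.List.pyRange 0 (min ((k : Int) * b) (dataset.length : Int)) 1).map
          (fun i => PySem.Int.mod (PySem.Int.floordiv i b) n_clus) := by
  intro k
  induction k with
  | zero => simp [PySem.List.pyRange_one_eq_nil]
  | succ k ih =>
    have hcast : ((k + 1 : Nat) : Int) = (k : Int) + 1 := by push_cast; ring
    rw [hcast, PySem.List.pyRange_one_succ_right (by positivity : (0:Int) ≤ (k : Int)),
      List.foldl_append, ih]
    simp only [List.foldl_cons, List.foldl_nil]
    set N : Int := (dataset.length : Int) with hN
    have hN0 : 0 ≤ N := by positivity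
    set m : Int := min ((k : Int) * b) N with hm
    set M : Int := min (((k : Int) + 1) * b) N with hM
    have hm0 : 0 ≤ m := by
      have : 0 ≤ (k : Int) * b := by positivity
      omega
    have hmM : m ≤ M := by
      have : (k : Int) * b ≤ ((k : Int) + 1) * b := by nlinarith
      omega
    have hlen : ((PySem.List.pyRange 0 m 1).map
        (fun i => PySem.Int.mod (PySem.Int.floordiv i b) n_clus)).length = m.toNat := by
      simp [PySem.List.length_pyRange_one]
    rw [pv_inner_fold dataset (PySem.Int.mod (k : Int) n_clus) _ _]
    rw [PySem.List.pyRange_one_append 0 m M hm0 hmM, List.map_append]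
    congr 1
    have hcnt : min b.toNat
        ((N - ((((PySem.List.pyRange 0 m 1).map
          (fun i => PySem.Int.mod (PySem.Int.floordiv i b) n_clus)).length : Int))).toNat)
        = (M - m).toNat := by
      rw [hlen]
      have hmtn : (m.toNat : Int) = m := by omega
      rw [hmtn]
      by_cases hle : N ≤ (k : Int) * b
      · have hmN : m = N := by omega
        have hMN : M = N := by
          have : N ≤ ((k : Int) + 1) * b := by nlinarith
          omega
        omega
      · have hmkb : m = (k : Int) * b := by omega
        have hMe : M = min ((k : Int) * b + b) N := by
          have hx : ((k : Int) + 1) * b = (k : Int) * b + b := by ring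
          rw [hM, hx]
        omega
    rw [hcnt]
    -- every index in [m, M) lies in chunk k, so B's labels there are constant
    symm
    rw [List.eq_replicate_iff]
    constructor
    · simp [PySem.List.length_pyRange_one]
    · intro x hx
      simp only [List.mem_map] at hx
      obtain ⟨i, hi, rfl⟩ := hx
      rw [PySem.List.mem_pyRange_one] at hi
      have hfl : PySem.Int.floordiv i b = (k : Int) := by
        rw [PySem.Int.floordiv_eq_iff_of_pos hb]
        by_cases hle : N ≤ (k : Int) * b
        · exfalso
          have hmN : m = N := by omega
          have hMN : M ≤ N := by omega
          omega
        · have hmkb : m = (k : Int) * b := by omega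
          have hx : ((k : Int) + 1) * b = (k : Int) * b + b := by ring
          have hMe : M ≤ ((k : Int) + 1) * b := by omega
          rw [hx] at hMe
          constructor <;> omega
      rw [hfl]

-- The main case (0 < buffer_size): A's total_chunks covers all of the dataset, so the
-- invariant at the last chunk gives exactly B's flat pass.
lemma pv_main (dataset : List Int) (n_clus b : Int) (hb : 0 < b) :
    (PySem.List.pyRange 0
        (PySem.Int.floordiv ((dataset.length : Int)) b +
          (if PySem.Int.mod ((dataset.length : Int)) b > 0 then 1 else 0)) 1).foldl
      (fun clusters chunk_index =>
        pvInnerLoopA dataset (PySem.Int.mod chunk_index n_clus) b.toNat clusters)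
      []
    = (PySem.List.pyRange 0 ((dataset.length : Int)) 1).map
        (fun i => PySem.Int.mod (PySem.Int.floordiv i b) n_clus) := by
  have hq := PySem.Int.floordiv_mul_add_mod ((dataset.length : Int)) b
  have hrlo := PySem.Int.mod_nonneg ((dataset.length : Int)) hb
  have hrhi := PySem.Int.mod_lt ((dataset.length : Int)) hb
  have hN0 : (0 : Int) ≤ (dataset.length : Int) := by positivity
  have hq0 : 0 ≤ PySem.Int.floordiv ((dataset.length : Int)) b :=
    (PySem.Int.le_floordiv_iff_mul_le hb).mpr (by omega)
  by_cases hr : PySem.Int.mod ((dataset.length : Int)) b > 0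
  · rw [if_pos hr]
    have hTcast : (((PySem.Int.floordiv ((dataset.length : Int)) b + 1).toNat : Nat) : Int)
        = PySem.Int.floordiv ((dataset.length : Int)) b + 1 := by omega
    rw [← hTcast, pv_outer_inv dataset n_clus b hb _]
    have hmin : min ((((PySem.Int.floordiv ((dataset.length : Int)) b + 1).toNat : Nat) : Int) * b)
        ((dataset.length : Int)) = (dataset.length : Int) := by
      rw [hTcast]
      have hx : (PySem.Int.floordiv ((dataset.length : Int)) b + 1) * b
          = PySem.Int.floordiv ((dataset.length : Int)) b * b + b := by ring
      rw [hx]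
      omega
    rw [hmin]
  · rw [if_neg hr, add_zero]
    have hTcast : (((PySem.Int.floordiv ((dataset.length : Int)) b).toNat : Nat) : Int)
        = PySem.Int.floordiv ((dataset.length : Int)) b := by omega
    rw [← hTcast, pv_outer_inv dataset n_clus b hb _]
    have hmin : min ((((PySem.Int.floordiv ((dataset.length : Int)) b).toNat : Nat) : Int) * b)
        ((dataset.length : Int)) = (dataset.length : Int) := by
      rw [hTcast]
      omega
    rw [hmin]

-- The empty-dataset case: the break condition holds immediately, so every chunk leaves
-- the accumulator unchanged and both sides are [].
lemma pv_empty (n_clus b : Int) :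
    random_split_chunk_by_chunk [] n_clus b = random_split_chunk_by_chunk_alt [] n_clus b := by
  unfold random_split_chunk_by_chunk random_split_chunk_by_chunk_alt
  simp only [PySem.List.len_eq, List.length_nil, Nat.cast_zero]
  have hstep : ∀ (cl : List Int) (c : Int),
      pvInnerLoopA [] (PySem.Int.mod c n_clus) b.toNat cl = cl := by
    intro cl c
    rw [pv_inner_fold [] (PySem.Int.mod c n_clus)]
    simp
  rw [PySem.List.foldl_congr_mem _ _ (fun acc _ => acc) _ (fun acc x _ => hstep acc x),
    PySem.List.foldl_ignore]
  simp [PySem.List.pyRange_one_eq_nil]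

-- ===== VERDICT (by name: the statement is the Claim_ definition above) =====
theorem random_split_chunk_by_chunk_spec : Claim_equal_random_split_chunk_by_chunk := by
  intro dataset n_clus b _ hpre
  rcases hpre with ⟨hb, _⟩ | ⟨hds, _⟩
  · show random_split_chunk_by_chunk dataset n_clus b = random_split_chunk_by_chunk_alt dataset n_clus b
    unfold random_split_chunk_by_chunk random_split_chunk_by_chunk_alt
    simp only [PySem.List.len_eq]
    exact pv_main dataset n_clus b hb
  · subst hds
    exact pv_empty n_clus b
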